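-- pv_equiv track=rewrite | github.com/sanjayta02/DSA0313-NLP | 11.py | parse_S
-- ===== SOURCE A (Python) =====
-- def parse_S(string, i):
--     # Rule S -> ab
--     if i + 1 < len(string) and string[i] == 'a' and string[i+1] == 'b':
--         return i + 2
--
--     # Rule S -> aSb
--     if i < len(string) and string[i] == 'a':
--         j = parse_S(string, i + 1)
--         if j != -1 and j < len(string) and string[j] == 'b':
--             return j + 1
--
--     return -1
-- ===== SOURCE B (Python) =====
-- def parse_S(string, i):
--     # Iterative count-then-verify recognition of a^k b^k starting at i.
--     if i < 0:
--         return -1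
--     n = len(string)
--     j = i
--     while j < n and string[j] == 'a':
--         j += 1
--     if j == i:
--         return -1
--     m = j
--     while m < n and string[m] == 'b':
--         m += 1
--     k = j - i
--     return j + k if m - j >= k else -1
-- ===== Notes on version B (the rewrite author's own statement) =====
-- stated objective: alternative
-- what changed: Replaces A's recursive-descent parser (one recursion level per 'a') with an iterative count-then-verify scan: count the run of 'a' from i, then count the run of 'b' after it and compare lengths.
-- outside the precondition, e.g. on parse_S('ab', -2): A returns 0, B returns -1
import Mathlib
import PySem

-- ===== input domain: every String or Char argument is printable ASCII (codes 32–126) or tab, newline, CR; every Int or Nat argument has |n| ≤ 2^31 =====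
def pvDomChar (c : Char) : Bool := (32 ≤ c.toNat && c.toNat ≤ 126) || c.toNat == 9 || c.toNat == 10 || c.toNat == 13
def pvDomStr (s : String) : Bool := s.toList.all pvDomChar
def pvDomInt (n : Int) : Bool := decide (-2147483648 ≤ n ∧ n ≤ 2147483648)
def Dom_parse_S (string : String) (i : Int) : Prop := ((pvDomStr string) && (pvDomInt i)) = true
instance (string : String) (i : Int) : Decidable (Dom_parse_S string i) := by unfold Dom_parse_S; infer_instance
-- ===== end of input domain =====

-- B replaces A's recursive-descent parse of a^k b^k with an iterative count-the-'a'-run-then-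
-- count-the-'b'-run scan (alternative decomposition, same O(n) cost, constant stack).


-- ===== PORT A =====
-- literal transliteration of A's recursive descent; Python's string[x] is PySem.List.pyGet?
def parseSrec (cs : List Char) (i : Int) : Int :=
  if i + 1 < (cs.length : Int) ∧ PySem.List.pyGet? cs i = some 'a'
       ∧ PySem.List.pyGet? cs (i + 1) = some 'b' then
    i + 2
  else if h : i < (cs.length : Int) ∧ PySem.List.pyGet? cs i = some 'a' then
    let j := parseSrec cs (i + 1)
    if j ≠ -1 ∧ j < (cs.length : Int) ∧ PySem.List.pyGet? cs j = some 'b' then j + 1 else -1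
  else
    -1
termination_by ((cs.length : Int) - i).toNat
decreasing_by
  have := h.1; omega

def parse_S (string : String) (i : Int) : Int := parseSrec string.toList i

-- ===== PORT B =====
-- the while loops of B: advance j while cs[j] == c
def scanRun (c : Char) (cs : List Char) (j : Int) : Int :=
  if h : j < (cs.length : Int) ∧ PySem.List.pyGet? cs j = some c then
    scanRun c cs (j + 1)
  else j
termination_by ((cs.length : Int) - j).toNat
decreasing_by
  have := h.1; omega

def parse_S_alt (string : String) (i : Int) : Int :=
  if i < 0 then -1
  else
    let cs := string.toList
    let j := scanRun 'a' cs i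
    if j = i then -1
    else
      let m := scanRun 'b' cs j
      let k := j - i
      if m - j ≥ k then j + k else -1

-- ===== PRECONDITION & SPEC =====
-- Pre_ excludes negative i: there A either raises IndexError (when i < -len(string)) or relies on Python's
-- negative-index wraparound, whose sentinel collision (a genuine parse result -1 read as failure)
-- no caller would specify; B returns -1 on all negative i.
def Pre_parse_S (string : String) (i : Int) : Prop := 0 ≤ i
instance (string : String) (i : Int) : Decidable (Pre_parse_S string i) := by
  unfold Pre_parse_S; infer_instance

def pvWitness_parse_S : String × Int := ("aabb", 0)

def Spec_parse_S (string : String) (i : Int) (out : Int) : Prop := out = parse_S_alt string i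
instance (string : String) (i : Int) (out : Int) : Decidable (Spec_parse_S string i out) := by
  unfold Spec_parse_S; infer_instance

-- ===== CLAIM (what is proved, stated in full; the proofs are below) =====
def Claim_equal_parse_S : Prop := ∀ (string : String) (i : Int), Dom_parse_S string i →
  Pre_parse_S string i → Spec_parse_S string i (parse_S string i)

-- ===== LEMMAS AND PROOFS =====

theorem scanRun_step (c : Char) (cs : List Char) (j : Int)
    (h : j < (cs.length : Int) ∧ PySem.List.pyGet? cs j = some c) :
    scanRun c cs j = scanRun c cs (j + 1) := by
  rw [scanRun]; simp [h]

theorem scanRun_stop_eq (c : Char) (cs : List Char) (j : Int)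
    (h : ¬ (j < (cs.length : Int) ∧ PySem.List.pyGet? cs j = some c)) :
    scanRun c cs j = j := by
  rw [scanRun]; simp [h]

theorem scanRun_ge_aux (c : Char) (cs : List Char) :
    ∀ (d : Nat) (j : Int), (((cs.length : Int) - j)).toNat ≤ d → j ≤ scanRun c cs j := by
  intro d
  induction d with
  | zero =>
    intro j hd
    by_cases h : j < (cs.length : Int) ∧ PySem.List.pyGet? cs j = some c
    · exact absurd h.1 (by omega)
    · rw [scanRun_stop_eq c cs j h]
  | succ d ih =>
    intro j hd
    by_cases h : j < (cs.length : Int) ∧ PySem.List.pyGet? cs j = some c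
    · rw [scanRun_step c cs j h]
      have h1 := h.1
      have := ih (j + 1) (by omega)
      omega
    · rw [scanRun_stop_eq c cs j h]

theorem scanRun_ge (c : Char) (cs : List Char) (j : Int) : j ≤ scanRun c cs j :=
  scanRun_ge_aux c cs (((cs.length : Int) - j)).toNat j le_rfl

theorem scanRun_le_aux (c : Char) (cs : List Char) :
    ∀ (d : Nat) (j : Int), (((cs.length : Int) - j)).toNat ≤ d →
      j ≤ (cs.length : Int) → scanRun c cs j ≤ (cs.length : Int) := by
  intro d
  induction d with
  | zero =>
    intro j hd hj
    by_cases h : j < (cs.length : Int) ∧ PySem.List.pyGet? cs j = some c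
    · exact absurd h.1 (by omega)
    · rw [scanRun_stop_eq c cs j h]; exact hj
  | succ d ih =>
    intro j hd hj
    by_cases h : j < (cs.length : Int) ∧ PySem.List.pyGet? cs j = some c
    · rw [scanRun_step c cs j h]
      have h1 := h.1
      exact ih (j + 1) (by omega) (by omega)
    · rw [scanRun_stop_eq c cs j h]; exact hj

theorem scanRun_le (c : Char) (cs : List Char) (j : Int) (h : j ≤ (cs.length : Int)) :
    scanRun c cs j ≤ (cs.length : Int) :=
  scanRun_le_aux c cs (((cs.length : Int) - j)).toNat j le_rfl h

theorem scanRun_stop_aux (c : Char) (cs : List Char) :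
    ∀ (d : Nat) (j : Int), (((cs.length : Int) - j)).toNat ≤ d →
      ¬ (scanRun c cs j < (cs.length : Int) ∧
          PySem.List.pyGet? cs (scanRun c cs j) = some c) := by
  intro d
  induction d with
  | zero =>
    intro j hd
    by_cases h : j < (cs.length : Int) ∧ PySem.List.pyGet? cs j = some c
    · exact absurd h.1 (by omega)
    · rw [scanRun_stop_eq c cs j h]; exact h
  | succ d ih =>
    intro j hd
    by_cases h : j < (cs.length : Int) ∧ PySem.List.pyGet? cs j = some c
    · rw [scanRun_step c cs j h]
      have h1 := h.1
      exact ih (j + 1) (by omega)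
    · rw [scanRun_stop_eq c cs j h]; exact h

theorem scanRun_stop (c : Char) (cs : List Char) (j : Int) :
    ¬ (scanRun c cs j < (cs.length : Int) ∧
        PySem.List.pyGet? cs (scanRun c cs j) = some c) :=
  scanRun_stop_aux c cs (((cs.length : Int) - j)).toNat j le_rfl

theorem scanRun_all_aux (c : Char) (cs : List Char) :
    ∀ (d : Nat) (j p : Int), (((cs.length : Int) - j)).toNat ≤ d → j ≤ p →
      p < scanRun c cs j → PySem.List.pyGet? cs p = some c := by
  intro d
  induction d with
  | zero =>
    intro j p hd h1 h2
    by_cases h : j < (cs.length : Int) ∧ PySem.List.pyGet? cs j = some c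
    · exact absurd h.1 (by omega)
    · rw [scanRun_stop_eq c cs j h] at h2; omega
  | succ d ih =>
    intro j p hd h1 h2
    by_cases h : j < (cs.length : Int) ∧ PySem.List.pyGet? cs j = some c
    · rcases eq_or_lt_of_le h1 with rfl | hlt
      · exact h.2
      · have hj := h.1
        rw [scanRun_step c cs j h] at h2
        exact ih (j + 1) p (by omega) (by omega) h2
    · rw [scanRun_stop_eq c cs j h] at h2; omega

theorem scanRun_all (c : Char) (cs : List Char) (j p : Int) (h1 : j ≤ p)
    (h2 : p < scanRun c cs j) : PySem.List.pyGet? cs p = some c :=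
  scanRun_all_aux c cs (((cs.length : Int) - j)).toNat j p le_rfl h1 h2

theorem alt_eval (s : String) (i : Int) (h0 : 0 ≤ i) :
    parse_S_alt s i =
      (if scanRun 'a' s.toList i = i then -1
       else if scanRun 'b' s.toList (scanRun 'a' s.toList i) - scanRun 'a' s.toList i ≥
              scanRun 'a' s.toList i - i
            then scanRun 'a' s.toList i + (scanRun 'a' s.toList i - i) else -1) := by
  rw [parse_S_alt, if_neg (by omega)]

theorem main_aux (s : String) (d : Nat) : ∀ i : Int, 0 ≤ i →
    (((s.toList.length : Int) - i)).toNat ≤ d → parseSrec s.toList i = parse_S_alt s i := by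
  induction d with
  | zero =>
    intro i h0 hd
    have hn : (s.toList.length : Int) ≤ i := by omega
    rw [parseSrec, if_neg (by omega), dif_neg (by omega), alt_eval s i h0,
      if_pos (scanRun_stop_eq 'a' s.toList i (by omega))]
  | succ d ih =>
    intro i h0 hd
    rw [alt_eval s i h0]
    by_cases hn : (s.toList.length : Int) ≤ i
    · rw [parseSrec, if_neg (by omega), dif_neg (by omega),
        if_pos (scanRun_stop_eq 'a' s.toList i (by omega))]
    · have hin : i < (s.toList.length : Int) := by omega
      by_cases hai : PySem.List.pyGet? s.toList i = some 'a'
      · have hstep : scanRun 'a' s.toList i = scanRun 'a' s.toList (i + 1) :=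
          scanRun_step 'a' s.toList i ⟨hin, hai⟩
        by_cases hb : i + 1 < (s.toList.length : Int) ∧
            PySem.List.pyGet? s.toList (i + 1) = some 'b'
        · -- base rule S -> ab fires
          rw [parseSrec, if_pos ⟨hb.1, hai, hb.2⟩]
          have hJ : scanRun 'a' s.toList (i + 1) = i + 1 :=
            scanRun_stop_eq 'a' s.toList (i + 1) (by
              intro hcon
              rw [hb.2] at hcon
              exact absurd hcon.2 (by decide))
          rw [hstep, hJ, if_neg (by omega)]
          have hm2 := scanRun_step 'b' s.toList (i + 1) ⟨hb.1, hb.2⟩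
          have hge := scanRun_ge 'b' s.toList (i + 1 + 1)
          rw [if_pos (by omega)]
          omega
        · -- base rule fails, recursive rule S -> aSb
          have hIH : parseSrec s.toList (i + 1) = parse_S_alt s (i + 1) :=
            ih (i + 1) (by omega) (by omega)
          rw [parseSrec, if_neg (fun hcon => hb ⟨hcon.1, hcon.2.2⟩), dif_pos ⟨hin, hai⟩]
          simp only [hIH, alt_eval s (i + 1) (by omega), hstep]
          have hJge : i + 1 ≤ scanRun 'a' s.toList (i + 1) := scanRun_ge 'a' s.toList (i + 1)
          have hJle : scanRun 'a' s.toList (i + 1) ≤ (s.toList.length : Int) :=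
            scanRun_le 'a' s.toList (i + 1) (by omega)
          have hmge := scanRun_ge 'b' s.toList (scanRun 'a' s.toList (i + 1))
          have hmle : scanRun 'b' s.toList (scanRun 'a' s.toList (i + 1)) ≤
              (s.toList.length : Int) :=
            scanRun_le 'b' s.toList (scanRun 'a' s.toList (i + 1)) hJle
          have hstop := scanRun_stop 'b' s.toList (scanRun 'a' s.toList (i + 1))
          have hall := scanRun_all 'b' s.toList (scanRun 'a' s.toList (i + 1))
          have hM1 : scanRun 'a' s.toList (i + 1) = i + 1 →
              scanRun 'b' s.toList (i + 1) = i + 1 :=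
            fun _ => scanRun_stop_eq 'b' s.toList (i + 1) hb
          split_ifs with h1 h2 h3 h4 h5 h6 h7 h8 h9 h10 h11 h12 <;>
            first
              | omega
              | skip
          · -- a-run of length 1, but no 'b' follows: the b-scan cannot move
            exfalso
            rw [h1] at h6
            have := hM1 h1
            omega
          · -- inner parse succeeded and s[j] = 'b', yet B lacks one 'b': impossible
            exfalso
            have hMeq : scanRun 'b' s.toList (scanRun 'a' s.toList (i + 1)) =
                scanRun 'a' s.toList (i + 1) + (scanRun 'a' s.toList (i + 1) - (i + 1)) := by
              omega
            rw [hMeq] at hstop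
            exact hstop ⟨h8.2.1, h8.2.2⟩
          · -- B found k 'b's but A's check at j failed: impossible
            exfalso
            exact h8 ⟨by omega, by omega, hall _ (by omega) (by omega)⟩
      · -- s[i] is not 'a': both fail immediately
        rw [parseSrec, if_neg (by
            intro hcon
            exact hai hcon.2.1), dif_neg (by
            intro hcon
            exact hai hcon.2),
          if_pos (scanRun_stop_eq 'a' s.toList i (by
            intro hcon
            exact hai hcon.2))]

theorem parse_S_spec : Claim_equal_parse_S := by
  intro s i _ hp
  show parse_S s i = parse_S_alt s i
  exact main_aux s ((((s.toList.length : Int) - i)).toNat) i hp le_rfl
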